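-- pv_equiv track=rewrite | github.com/m-argarita-m/artificial-intelligence-tamu | programming_assignment_1/helper_functions.py | h4
-- ===== SOURCE A (Python) =====
-- def h4(current_state_positions_dict, goal_state_positions_dict):
--     h_score = 0
--
--     for block, (current_stack, current_height) in current_state_positions_dict.items():
--         if block in goal_state_positions_dict:
--             goal_stack, goal_height = goal_state_positions_dict[block]
--
--             if current_stack != goal_stack or current_height != goal_height:
--                 must_be_moved_once = False
--                 must_be_moved_twice = False
--
--                 for other_block, (other_stack, other_height) in current_state_positions_dict.items():
--                     if other_stack == current_stack and other_height < current_height: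
--                         if (other_block not in goal_state_positions_dict) or (goal_state_positions_dict[other_block] != (goal_stack, other_height)):
--                             must_be_moved_once = True
--                             break
--
--                 for other_block, (other_stack, other_height) in current_state_positions_dict.items():
--                     if (other_stack == current_stack) and (other_height < current_height):
--                         if (other_block in goal_state_positions_dict) and (goal_state_positions_dict[other_block] == (goal_stack, other_height)):
--                             must_be_moved_twice = True
--                             break
--
--                 if must_be_moved_once:
--                     h_score += 1
--                 elif must_be_moved_twice:
--                     h_score += 4
--
--     return h_score
-- ===== SOURCE B (Python) =====
-- def h4(current_state_positions_dict, goal_state_positions_dict):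
--     # Index the current blocks by stack once, so each block only scans its own stack.
--     stacks = {}
--     for block, (stack, height) in current_state_positions_dict.items():
--         stacks.setdefault(stack, []).append((block, height))
--
--     total = 0
--     for block, (stack, height) in current_state_positions_dict.items():
--         g = goal_state_positions_dict.get(block)
--         if g is None or g == (stack, height):
--             continue
--         below = [(ob, oh) for ob, oh in stacks[stack] if oh < height]
--         if any(goal_state_positions_dict.get(ob) != (g[0], oh) for ob, oh in below):
--             total += 1
--         elif below:
--             total += 4
--     return total
-- ===== Notes on version B (the rewrite author's own statement) =====
-- stated objective: faster
-- what changed: B builds a per-stack index of (block, height) once and replaces A's two full-dictionary break-scans per misplaced block by one any-mismatch test plus a non-emptiness test over only the block's own stack.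
import Mathlib
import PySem

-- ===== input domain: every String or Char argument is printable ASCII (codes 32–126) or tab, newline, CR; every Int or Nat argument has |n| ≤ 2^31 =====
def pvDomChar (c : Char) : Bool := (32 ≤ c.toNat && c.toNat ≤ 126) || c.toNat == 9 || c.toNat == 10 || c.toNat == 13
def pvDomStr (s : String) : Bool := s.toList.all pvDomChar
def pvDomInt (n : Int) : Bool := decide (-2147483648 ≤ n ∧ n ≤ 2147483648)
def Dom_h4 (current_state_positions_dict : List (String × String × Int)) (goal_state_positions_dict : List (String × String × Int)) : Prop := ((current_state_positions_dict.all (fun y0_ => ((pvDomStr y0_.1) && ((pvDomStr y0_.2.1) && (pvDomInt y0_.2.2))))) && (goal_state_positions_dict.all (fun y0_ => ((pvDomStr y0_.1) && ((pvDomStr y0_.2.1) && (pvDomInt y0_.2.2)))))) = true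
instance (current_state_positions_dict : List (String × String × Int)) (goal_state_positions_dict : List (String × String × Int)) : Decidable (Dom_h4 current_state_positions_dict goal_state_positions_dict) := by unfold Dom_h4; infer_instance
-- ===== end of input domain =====

-- ===== PORT A =====
-- B indexes the current blocks by stack once, so each misplaced block scans only its own stack instead of the whole dictionary (measured faster); equal return values proved below.
def h4 (current_state_positions_dict : List (String × String × Int)) (goal_state_positions_dict : List (String × String × Int)) : Int :=
  let curD := PySem.Dict.ofList current_state_positions_dict
  let goalD := PySem.Dict.ofList goal_state_positions_dict
  curD.items.foldl (fun h_score bp =>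
    match goalD.get? bp.1 with
    | none => h_score
    | some gp =>
      if bp.2.1 ≠ gp.1 ∨ bp.2.2 ≠ gp.2 then
        -- 'for …: if …: must_be_moved_once = True; break' — the flag is exactly an existence scan
        let must_once := curD.items.any (fun op =>
          op.2.1 == bp.2.1 && op.2.2 < bp.2.2 &&
            (match goalD.get? op.1 with | none => true | some g => decide (g ≠ (gp.1, op.2.2))))
        let must_twice := curD.items.any (fun op =>
          op.2.1 == bp.2.1 && op.2.2 < bp.2.2 &&
            (match goalD.get? op.1 with | none => false | some g => decide (g = (gp.1, op.2.2))))
        if must_once then h_score + 1 else if must_twice then h_score + 4 else h_score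
      else h_score) 0

-- ===== PORT B =====
def h4_alt (current_state_positions_dict : List (String × String × Int)) (goal_state_positions_dict : List (String × String × Int)) : Int :=
  let curD := PySem.Dict.ofList current_state_positions_dict
  let goalD := PySem.Dict.ofList goal_state_positions_dict
  -- stacks.setdefault(stack, []).append((block, height))
  let stackIndex := curD.items.foldl (fun d p => d.modify p.2.1 [] (· ++ [(p.1, p.2.2)])) PySem.Dict.empty
  curD.items.foldl (fun total p =>
    match goalD.get? p.1 with
    | none => total
    | some g =>
      if g = p.2 then total
      else
        let below := (stackIndex.getD p.2.1 []).filter (fun q => q.2 < p.2.2)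
        if below.any (fun q => decide (goalD.get? q.1 ≠ some (g.1, q.2))) then total + 1
        else if below ≠ [] then total + 4
        else total) 0

-- ===== PRECONDITION & SPEC =====
def Spec_h4 (current_state_positions_dict : List (String × String × Int)) (goal_state_positions_dict : List (String × String × Int)) (out : Int) : Prop := out = h4_alt current_state_positions_dict goal_state_positions_dict
instance (current_state_positions_dict : List (String × String × Int)) (goal_state_positions_dict : List (String × String × Int)) (out : Int) : Decidable (Spec_h4 current_state_positions_dict goal_state_positions_dict out) := by unfold Spec_h4; infer_instance

-- ===== CLAIM (what is proved, stated in full; the proofs are below) =====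
def Claim_equal_h4 : Prop := ∀ (current_state_positions_dict : List (String × String × Int)) (goal_state_positions_dict : List (String × String × Int)), Dom_h4 current_state_positions_dict goal_state_positions_dict → Spec_h4 current_state_positions_dict goal_state_positions_dict (h4 current_state_positions_dict goal_state_positions_dict)

-- ===== LEMMAS AND PROOFS =====

-- B's per-stack index answers 'all current blocks on stack s, in insertion order'.
lemma stacks_getD (items : List (String × String × Int)) (s : String) :
    ((items.foldl (fun d p => d.modify p.2.1 [] (· ++ [(p.1, p.2.2)])) PySem.Dict.empty).getD s [])
      = (items.filter (fun p => p.2.1 == s)).map (fun p => (p.1, p.2.2)) := by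
  have h : items.foldl (fun d p => d.modify p.2.1 [] (· ++ [(p.1, p.2.2)])) PySem.Dict.empty
      = ((items.map (fun (p : String × String × Int) => (p.2.1, (p.1, p.2.2)))).foldl
          (fun (d : PySem.Dict String (List (String × Int))) q => d.modify q.1 [] (· ++ [q.2]))
          PySem.Dict.empty) :=
    (List.foldl_map (f := fun (p : String × String × Int) => (p.2.1, (p.1, p.2.2)))
      (g := fun (d : PySem.Dict String (List (String × Int))) q => d.modify q.1 [] (· ++ [q.2]))
      (l := items) (init := PySem.Dict.empty)).symm
  rw [h, PySem.Dict.getD_foldl_modify_append]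
  simp [List.filter_map, List.map_map, Function.comp_def]

-- The two loop bodies agree on every block.
lemma step_eq (goalD : PySem.Dict String (String × Int)) (items : List (String × String × Int))
    (acc : Int) (p : String × String × Int) :
    (match goalD.get? p.1 with
      | none => acc
      | some gp =>
        if p.2.1 ≠ gp.1 ∨ p.2.2 ≠ gp.2 then
          let must_once := items.any (fun op =>
            op.2.1 == p.2.1 && op.2.2 < p.2.2 &&
              (match goalD.get? op.1 with | none => true | some g => decide (g ≠ (gp.1, op.2.2))))
          let must_twice := items.any (fun op =>
            op.2.1 == p.2.1 && op.2.2 < p.2.2 &&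
              (match goalD.get? op.1 with | none => false | some g => decide (g = (gp.1, op.2.2))))
          if must_once then acc + 1 else if must_twice then acc + 4 else acc
        else acc)
    = (match goalD.get? p.1 with
      | none => acc
      | some g =>
        if g = p.2 then acc
        else
          let below := ((items.foldl (fun d p => d.modify p.2.1 [] (· ++ [(p.1, p.2.2)]))
              PySem.Dict.empty).getD p.2.1 []).filter (fun q => q.2 < p.2.2)
          if below.any (fun q => decide (goalD.get? q.1 ≠ some (g.1, q.2))) then acc + 1
          else if below ≠ [] then acc + 4
          else acc) := by
  cases hg : goalD.get? p.1 with
  | none => rfl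
  | some g =>
    obtain ⟨gs, gh⟩ := g
    by_cases he : (gs, gh) = p.2
    · have h1 : ¬(p.2.1 ≠ gs ∨ p.2.2 ≠ gh) := by
        rw [Prod.ext_iff] at he; push_neg; exact ⟨he.1.symm, he.2.symm⟩
      simp [h1, he]
    · have h1 : p.2.1 ≠ gs ∨ p.2.2 ≠ gh := by
        by_contra hc; push_neg at hc; exact he (Prod.ext hc.1.symm hc.2.symm)
      simp only [if_neg he, if_pos h1, stacks_getD]
      have hb1 : (((List.filter (fun q => decide (q.2 < p.2.2))
              (List.map (fun r => (r.1, r.2.2)) (List.filter (fun r => r.2.1 == p.2.1) items))).any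
            (fun q => decide (goalD.get? q.1 ≠ some (gs, q.2)))) = true)
          ↔ ((items.any (fun op =>
              op.2.1 == p.2.1 && op.2.2 < p.2.2 &&
                (match goalD.get? op.1 with | none => true | some g => decide (g ≠ (gs, op.2.2))))) = true) := by
        simp only [List.any_filter, List.any_map, Function.comp_def]
        constructor <;>
        · rw [List.any_eq_true, List.any_eq_true]
          rintro ⟨op, hop, hcond⟩
          refine ⟨op, hop, ?_⟩
          cases hgo : goalD.get? op.1 <;>
            [skip; skip] <;> simp [hgo] at hcond ⊢ <;> tauto
      have hb2 : ¬ ((items.any (fun op =>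
              op.2.1 == p.2.1 && op.2.2 < p.2.2 &&
                (match goalD.get? op.1 with | none => true | some g => decide (g ≠ (gs, op.2.2))))) = true) →
          (((items.any (fun op =>
              op.2.1 == p.2.1 && op.2.2 < p.2.2 &&
                (match goalD.get? op.1 with | none => false | some g => decide (g = (gs, op.2.2))))) = true)
          ↔ ¬ ((List.filter (fun q => decide (q.2 < p.2.2))
              (List.map (fun r => (r.1, r.2.2)) (List.filter (fun r => r.2.1 == p.2.1) items))) = [])) := by
        intro ho
        rw [Bool.not_eq_true, List.any_eq_false] at ho
        constructor
        · rw [List.any_eq_true]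
          rintro ⟨op, hop, hcond⟩
          intro hnil
          have hmem : (op.1, op.2.2) ∈ (List.filter (fun q => decide (q.2 < p.2.2))
              (List.map (fun r => (r.1, r.2.2)) (List.filter (fun r => r.2.1 == p.2.1) items))) := by
            simp only [Bool.and_eq_true] at hcond
            refine List.mem_filter.mpr ⟨List.mem_map.mpr ⟨op, List.mem_filter.mpr ⟨hop, hcond.1.1⟩, rfl⟩, hcond.1.2⟩
          rw [hnil] at hmem; exact absurd hmem (List.not_mem_nil)
        · intro hne
          obtain ⟨q, hq⟩ := List.exists_mem_of_ne_nil _ hne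
          have hq' := List.mem_filter.mp hq
          obtain ⟨op, hopf, hqe⟩ := List.mem_map.mp hq'.1
          have hopf' := List.mem_filter.mp hopf
          have hho := ho op hopf'.1
          rw [List.any_eq_true]
          refine ⟨op, hopf'.1, ?_⟩
          have hs : (op.2.1 == p.2.1) = true := hopf'.2
          have hlt : decide (op.2.2 < p.2.2) = true := by subst hqe; exact hq'.2
          cases hgo : goalD.get? op.1 with
          | none => rw [hgo] at hho; simp [hs, hlt] at hho
          | some g2 =>
            rw [hgo] at hho
            simp only [hs, hlt, Bool.true_and, Bool.and_eq_true] at hho ⊢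
            simpa using hho
      by_cases hA1 : ((items.any (fun op =>
              op.2.1 == p.2.1 && op.2.2 < p.2.2 &&
                (match goalD.get? op.1 with | none => true | some g => decide (g ≠ (gs, op.2.2))))) = true)
      · rw [if_pos hA1, if_pos (hb1.mpr hA1)]
      · rw [if_neg hA1, if_neg (fun h => hA1 (hb1.mp h))]
        have h2 := hb2 hA1
        by_cases hA2 : ((items.any (fun op =>
              op.2.1 == p.2.1 && op.2.2 < p.2.2 &&
                (match goalD.get? op.1 with | none => false | some g => decide (g = (gs, op.2.2))))) = true)
        · rw [if_pos hA2, if_pos (h2.mp hA2)]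
        · rw [if_neg hA2, if_neg (fun h => hA2 (h2.mpr h))]

theorem foldl_main (cur goalL : List (String × String × Int)) : h4 cur goalL = h4_alt cur goalL := by
  unfold h4 h4_alt
  dsimp only
  congr 1
  funext acc p
  exact step_eq (PySem.Dict.ofList goalL) (PySem.Dict.ofList cur).items acc p

-- ===== VERDICT (by name: the statement is the Claim_ definition above) =====
theorem h4_spec : Claim_equal_h4 := by
  intro cur goalL _
  unfold Spec_h4
  exact foldl_main cur goalL
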